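-- pv_equiv track=rewrite | github.com/anon-reviewer123/InvGuard | InvGuard/flow_1_files/Z3Checker/invariants/translator.py | _split_top
-- ===== SOURCE A (Python) =====
-- from typing import List, Dict, Any, Tuple, Optional
--
-- def _split_top(s: str, sep: str) -> Optional[int]:
--     d1 = d2 = 0  # () and []
--     i = 0
--     L, LS = len(s), len(sep)
--     while i <= L - LS:
--         ch = s[i]
--         if ch == '(': d1 += 1
--         elif ch == ')': d1 -= 1
--         elif ch == '[': d2 += 1
--         elif ch == ']': d2 -= 1
--         if d1 == 0 and d2 == 0 and s[i:i+LS] == sep: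
--             return i
--         i += 1
--     return None
-- ===== SOURCE B (Python) =====
-- from typing import Optional
--
-- def _split_top(s: str, sep: str) -> Optional[int]:
--     # One pass builds, for each index i, the (paren, bracket) depths AFTER s[i];
--     # then str.find locates candidate occurrences of sep and the table decides each one.
--     depths = []
--     d1 = d2 = 0
--     for ch in s:
--         if ch == '(': d1 += 1
--         elif ch == ')': d1 -= 1
--         elif ch == '[': d2 += 1
--         elif ch == ']': d2 -= 1
--         depths.append((d1, d2))
--     start = 0
--     while True:
--         j = s.find(sep, start)
--         if j == -1:
--             return None
--         if depths[j] == (0, 0):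
--             return j
--         start = j + 1
-- ===== Notes on version B (the rewrite author's own statement) =====
-- stated objective: alternative
-- what changed: Replaces the per-index depth-update-and-substring-compare loop by a precomputed depth table plus a str.find-driven scan that only inspects actual occurrences of sep.
-- outside the precondition, e.g. on _split_top('a', ''): A returns 0, B returns 0
import Mathlib
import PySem

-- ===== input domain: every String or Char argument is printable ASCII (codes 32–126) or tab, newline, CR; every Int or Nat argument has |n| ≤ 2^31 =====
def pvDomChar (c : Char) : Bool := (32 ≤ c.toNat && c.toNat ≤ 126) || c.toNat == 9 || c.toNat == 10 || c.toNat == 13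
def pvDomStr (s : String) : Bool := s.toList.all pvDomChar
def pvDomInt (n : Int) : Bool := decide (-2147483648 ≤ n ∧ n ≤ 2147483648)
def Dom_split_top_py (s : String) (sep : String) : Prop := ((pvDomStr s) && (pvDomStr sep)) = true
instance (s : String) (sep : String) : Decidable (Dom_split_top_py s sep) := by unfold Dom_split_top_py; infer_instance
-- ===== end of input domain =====

-- B replaces A's per-index depth-update-and-match loop by a precomputed depth table plus a
-- find-driven scan over actual occurrences of sep (objective: alternative decomposition).


-- ===== PORT A =====
-- the while loop of A; state (d1, d2, i); returns none where Python raises IndexError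
-- (only reachable for sep = "", which Pre_ excludes)
def pvAloop (cs sep : List Char) (L LS : Int) (d1 d2 i : Int) : Option Int :=
  if _h : i ≤ L - LS then
    match PySem.List.pyGet? cs i with
    | none => none      -- IndexError (outside Pre_)
    | some ch =>
      let d1' : Int := if ch = '(' then d1 + 1 else if ch = ')' then d1 - 1 else d1
      let d2' : Int := if ch = '[' then d2 + 1 else if ch = ']' then d2 - 1 else d2
      if d1' = 0 ∧ d2' = 0 ∧ PySem.List.slice cs (some i) (some (i + LS)) = sep then some i
      else pvAloop cs sep L LS d1' d2' (i + 1)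
  else none
termination_by (L - LS + 1 - i).toNat
decreasing_by omega

def split_top_py (s : String) (sep : String) : Option Int :=
  pvAloop s.toList sep.toList s.toList.length sep.toList.length 0 0 0

-- ===== PORT B =====
-- one step of B's depth-table pass: update (d1, d2) and append the pair
def pvBstep (acc : (Int × Int) × List (Int × Int)) (ch : Char) : (Int × Int) × List (Int × Int) :=
  let d1' : Int := if ch = '(' then acc.1.1 + 1 else if ch = ')' then acc.1.1 - 1 else acc.1.1
  let d2' : Int := if ch = '[' then acc.1.2 + 1 else if ch = ']' then acc.1.2 - 1 else acc.1.2
  ((d1', d2'), acc.2 ++ [(d1', d2')])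

-- B's for-loop over s building the depths table
def pvBscan (cs : List Char) : (Int × Int) × List (Int × Int) :=
  cs.foldl pvBstep ((0, 0), [])

-- the while-True find loop of B; the dependent guard only supplies totality
-- (in Python j = -1 exits; findFrom otherwise returns an index with start ≤ j ≤ len)
def pvBloop (cs sep : List Char) (depths : List (Int × Int)) (start : Int) : Option Int :=
  let j := PySem.Chars.findFrom cs sep start none
  if _h : 0 ≤ j ∧ start ≤ j ∧ j ≤ (cs.length : Int) then
    match PySem.List.pyGet? depths j with
    | none => none      -- IndexError (outside Pre_)
    | some d => if d = ((0 : Int), (0 : Int)) then some j else pvBloop cs sep depths (j + 1)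
  else none             -- j = -1 in Python
termination_by ((cs.length : Int) + 1 - start).toNat
decreasing_by omega

def split_top_py_alt (s : String) (sep : String) : Option Int :=
  pvBloop s.toList sep.toList (pvBscan s.toList).2 0

-- ===== PRECONDITION & SPEC =====
-- Pre_ excludes only the empty separator: there A indexes s[i] at i = len(s) and raises
-- IndexError unless an earlier position has both depths zero, an accident of the
-- check-after-update loop; B raises the same IndexError on the same inputs.
def Pre_split_top_py (s : String) (sep : String) : Prop := sep ≠ ""
instance (s : String) (sep : String) : Decidable (Pre_split_top_py s sep) := by unfold Pre_split_top_py; infer_instance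

def pvWitness_split_top_py : String × String := ("(a),b", ",")

def Spec_split_top_py (s : String) (sep : String) (out : Option Int) : Prop := out = split_top_py_alt s sep
instance (s : String) (sep : String) (out : Option Int) : Decidable (Spec_split_top_py s sep out) := by unfold Spec_split_top_py; infer_instance

-- ===== CLAIM (what is proved, stated in full; the proofs are below) =====
def Claim_equal_split_top_py : Prop := ∀ (s : String) (sep : String), Dom_split_top_py s sep → Pre_split_top_py s sep → Spec_split_top_py s sep (split_top_py s sep)

-- ===== LEMMAS AND PROOFS =====

-- the depth transition of one character
def pvStep (st : Int × Int) (ch : Char) : Int × Int :=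
  (if ch = '(' then st.1 + 1 else if ch = ')' then st.1 - 1 else st.1,
   if ch = '[' then st.2 + 1 else if ch = ']' then st.2 - 1 else st.2)

-- reference depth table: entry k is the depth after the (k+1)-character prefix
def pvTab (st : Int × Int) : List Char → List (Int × Int)
  | [] => []
  | c :: cs => pvStep st c :: pvTab (pvStep st c) cs

theorem pvBstep_eq (st : Int × Int) (acc : List (Int × Int)) (c : Char) :
    pvBstep (st, acc) c = (pvStep st c, acc ++ [pvStep st c]) := by
  simp [pvBstep, pvStep]

theorem pvBscan_aux (cs : List Char) (st : Int × Int) (acc : List (Int × Int)) :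
    cs.foldl pvBstep (st, acc) = (cs.foldl pvStep st, acc ++ pvTab st cs) := by
  induction cs generalizing st acc with
  | nil => simp [pvTab]
  | cons c cs ih =>
    simp only [List.foldl_cons, pvBstep_eq, pvTab, ih, List.append_assoc, List.singleton_append]

theorem pvBscan_snd (cs : List Char) : (pvBscan cs).2 = pvTab (0, 0) cs := by
  simp [pvBscan, pvBscan_aux]

theorem pvTab_length (cs : List Char) (st : Int × Int) : (pvTab st cs).length = cs.length := by
  induction cs generalizing st with
  | nil => rfl
  | cons c cs ih => simp [pvTab, ih]

theorem pvTab_getElem (cs : List Char) (st : Int × Int) (k : Nat) (hk : k < cs.length) :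
    (pvTab st cs)[k]'(by rw [pvTab_length]; exact hk) = (cs.take (k + 1)).foldl pvStep st := by
  induction cs generalizing st k with
  | nil => simp at hk
  | cons c cs ih =>
    cases k with
    | zero => simp [pvTab]
    | succ k =>
      have hk' : k < cs.length := by simpa using hk
      simpa [pvTab, List.take_succ_cons] using ih (pvStep st c) k hk'

-- find points exactly at position m when sep occurs there and nowhere earlier
theorem pv_find_eq_of (l sub : List Char) (m : Nat) (hm : sub <+: l.drop m)
    (hmin : ∀ m' < m, ¬ sub <+: l.drop m') : PySem.Chars.find l sub = (m : Int) := by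
  have hinf : sub <:+: l := hm.isInfix.trans (List.drop_suffix m l).isInfix
  have h0 : 0 ≤ PySem.Chars.find l sub := (PySem.Chars.find_nonneg_iff l sub).mpr hinf
  obtain ⟨hpre, hlt⟩ := PySem.Chars.find_spec h0
  have hEq : (PySem.Chars.find l sub).toNat = m := by
    rcases lt_trichotomy (PySem.Chars.find l sub).toNat m with h | h | h
    · exact absurd hpre (hmin _ h)
    · exact h
    · exact absurd hm (hlt m h)
  omega

theorem pv_find_zero (l sub : List Char) (h : sub <+: l) : PySem.Chars.find l sub = 0 := by
  have := pv_find_eq_of l sub 0 (by simpa using h) (by intro m' hm'; omega)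
  simpa using this

theorem pv_find_tail (l sub : List Char) (hsub : sub ≠ []) (h0 : ¬ sub <+: l) :
    PySem.Chars.find l sub =
      if PySem.Chars.find (l.drop 1) sub = -1 then -1
      else 1 + PySem.Chars.find (l.drop 1) sub := by
  split_ifs with hneg
  · rw [PySem.Chars.find_eq_neg_one_iff] at hneg ⊢
    intro hinf
    apply hneg
    obtain ⟨j, hj⟩ := (PySem.Chars.exists_prefix_drop_iff_isIn sub l).mpr
      ((PySem.Chars.isIn_iff_infix sub l).mpr hinf)
    rcases j with _ | j
    · exact absurd (by simpa using hj) h0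
    · have hj' : sub <+: (l.drop 1).drop j := by
        rw [List.drop_drop, Nat.add_comm]; exact hj
      exact ((PySem.Chars.isIn_iff_infix sub (l.drop 1)).mp
        ((PySem.Chars.exists_prefix_drop_iff_isIn sub (l.drop 1)).mp ⟨j, hj'⟩))
  · have hk0 : 0 ≤ PySem.Chars.find (l.drop 1) sub := by
      have := PySem.Chars.neg_one_le_find (l.drop 1) sub
      omega
    obtain ⟨hp, hmin⟩ := PySem.Chars.find_spec hk0
    have hres := pv_find_eq_of l sub ((PySem.Chars.find (l.drop 1) sub).toNat + 1)
      (by rw [show l.drop ((PySem.Chars.find (l.drop 1) sub).toNat + 1)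
                = (l.drop 1).drop (PySem.Chars.find (l.drop 1) sub).toNat by
              rw [List.drop_drop, Nat.add_comm]]
          exact hp)
      (by intro m' hm'
          rcases m' with _ | t
          · simpa using h0
          · have ht : t < (PySem.Chars.find (l.drop 1) sub).toNat := by omega
            have := hmin t ht
            rw [show l.drop (t + 1) = (l.drop 1).drop t by rw [List.drop_drop, Nat.add_comm]]
            exact this)
    rw [hres]
    push_cast
    omega

-- skipping a non-occurrence position does not change findFrom
theorem pv_findFrom_succ (cs sub : List Char) (i : Nat) (hi : i < cs.length)
    (hno : ¬ sub <+: cs.drop i) (hsub : sub ≠ []) :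
    PySem.Chars.findFrom cs sub (i : Int) none
      = PySem.Chars.findFrom cs sub ((i : Int) + 1) none := by
  rw [PySem.Chars.findFrom_natCast cs sub i (le_of_lt hi),
      show ((i : Int) + 1) = ((i + 1 : Nat) : Int) by push_cast; ring,
      PySem.Chars.findFrom_natCast cs sub (i + 1) hi]
  rw [pv_find_tail (cs.drop i) sub hsub hno]
  rw [show List.drop 1 (List.drop i cs) = List.drop (i + 1) cs by
        rw [List.drop_drop, Nat.add_comm]]
  by_cases hk : PySem.Chars.find (cs.drop (i + 1)) sub = -1
  · simp [hk]
  · have hk0 : 0 ≤ PySem.Chars.find (cs.drop (i + 1)) sub := by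
      have := PySem.Chars.neg_one_le_find (cs.drop (i + 1)) sub
      omega
    rw [if_neg hk, if_neg (by omega), if_neg hk]
    push_cast
    ring

-- no occurrence fits beyond position i when fewer than |sub| characters remain
theorem pv_findFrom_none (cs sub : List Char) (hsub : sub ≠ []) (i : Nat) (hi : i ≤ cs.length)
    (hbig : cs.length < i + sub.length) :
    PySem.Chars.findFrom cs sub (i : Int) none = -1 := by
  rw [PySem.Chars.findFrom_natCast cs sub i hi]
  have hfind : PySem.Chars.find (cs.drop i) sub = -1 := by
    rw [PySem.Chars.find_eq_neg_one_iff]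
    intro hinf
    have hlen := hinf.length_le
    rw [List.length_drop] at hlen
    omega
  simp [hfind]

-- the main loop correspondence: A's scan from i equals B's find loop from i,
-- provided A's depth state is the depth of the i-character prefix
theorem pv_main (cs sub : List Char) (hsub : sub ≠ []) :
    ∀ n i : Nat, cs.length - i = n → i ≤ cs.length →
    pvAloop cs sub cs.length sub.length
      ((cs.take i).foldl pvStep (0, 0)).1 ((cs.take i).foldl pvStep (0, 0)).2 (i : Int)
      = pvBloop cs sub (pvTab (0, 0) cs) (i : Int) := by
  have hsubpos : 0 < sub.length := List.length_pos_iff.mpr hsub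
  intro n
  induction n with
  | zero =>
    intro i hni hile
    rw [pvAloop, dif_neg (by omega)]
    rw [pvBloop, pv_findFrom_none cs sub hsub i hile (by omega), dif_neg (by omega)]
  | succ n ih =>
    intro i hni hile
    have hilt : i < cs.length := by omega
    by_cases hroom : i + sub.length ≤ cs.length
    case neg =>
      rw [pvAloop, dif_neg (by omega)]
      rw [pvBloop, pv_findFrom_none cs sub hsub i hile (by omega), dif_neg (by omega)]
    case pos =>
      have hch : PySem.List.pyGet? cs (i : Int) = some (cs[i]'hilt) := by
        rw [PySem.List.pyGet?_natCast, List.getElem?_eq_getElem hilt]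
      have hst' : (cs.take (i + 1)).foldl pvStep (0, 0)
          = pvStep ((cs.take i).foldl pvStep (0, 0)) (cs[i]'hilt) := by
        rw [List.take_succ, List.getElem?_eq_getElem hilt]
        rw [Option.toList_some, List.foldl_append, List.foldl_cons, List.foldl_nil]
      have hd1 : (if cs[i]'hilt = '(' then ((cs.take i).foldl pvStep (0, 0)).1 + 1
              else if cs[i]'hilt = ')' then ((cs.take i).foldl pvStep (0, 0)).1 - 1
              else ((cs.take i).foldl pvStep (0, 0)).1)
            = ((cs.take (i + 1)).foldl pvStep (0, 0)).1 := by rw [hst']; rfl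
      have hd2 : (if cs[i]'hilt = '[' then ((cs.take i).foldl pvStep (0, 0)).2 + 1
              else if cs[i]'hilt = ']' then ((cs.take i).foldl pvStep (0, 0)).2 - 1
              else ((cs.take i).foldl pvStep (0, 0)).2)
            = ((cs.take (i + 1)).foldl pvStep (0, 0)).2 := by rw [hst']; rfl
      have hslice : PySem.List.slice cs (some (i : Int)) (some ((i : Int) + (sub.length : Int)))
          = (cs.drop i).take sub.length := PySem.List.slice_natCast_add cs i sub.length
      have hpref_iff : ((cs.drop i).take sub.length = sub) ↔ sub <+: cs.drop i := by
        constructor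
        · intro h; rw [← h]; exact List.take_prefix _ _
        · intro h; exact (List.prefix_iff_eq_take.mp h).symm
      have hcast : ((i : Int) + 1) = ((i + 1 : Nat) : Int) := by push_cast; ring
      rw [pvAloop, dif_pos (by omega), hch]
      by_cases hp : sub <+: cs.drop i
      · -- sep occurs at i: B's find lands exactly on i
        have hfind : PySem.Chars.findFrom cs sub (i : Int) none = (i : Int) := by
          rw [PySem.Chars.findFrom_natCast cs sub i hile, pv_find_zero _ _ hp]
          simp
        have htab : PySem.List.pyGet? (pvTab (0, 0) cs) (i : Int)
            = some ((cs.take (i + 1)).foldl pvStep (0, 0)) := by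
          rw [PySem.List.pyGet?_natCast,
              List.getElem?_eq_getElem (by rw [pvTab_length]; exact hilt),
              pvTab_getElem cs (0, 0) i hilt]
        rw [pvBloop]
        simp only [hfind]
        rw [dif_pos (by omega), htab]
        by_cases hz : (cs.take (i + 1)).foldl pvStep (0, 0) = ((0 : Int), (0 : Int))
        · simp only [hd1, hd2, hslice]
          rw [if_pos ⟨by rw [hz], by rw [hz], hpref_iff.mpr hp⟩]
          simp [hz]
        · simp only [hd1, hd2, hslice]
          rw [if_neg (by intro hc; exact hz (Prod.ext_iff.mpr ⟨hc.1, hc.2.1⟩))]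
          simp only [if_neg hz]
          rw [hcast]
          exact ih (i + 1) (by omega) (by omega)
      · -- no occurrence at i: both sides step to i + 1
        have hBstep : pvBloop cs sub (pvTab (0, 0) cs) (i : Int)
            = pvBloop cs sub (pvTab (0, 0) cs) ((i : Int) + 1) := by
          conv_lhs => rw [pvBloop]
          conv_rhs => rw [pvBloop]
          rw [pv_findFrom_succ cs sub i hilt hp hsub, hcast,
              PySem.Chars.findFrom_natCast cs sub (i + 1) hilt]
          by_cases hk : PySem.Chars.find (cs.drop (i + 1)) sub = -1
          · simp [hk]
          · have hk0 : 0 ≤ PySem.Chars.find (cs.drop (i + 1)) sub := by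
              have := PySem.Chars.neg_one_le_find (cs.drop (i + 1)) sub
              omega
            have hkle := PySem.Chars.find_le_length (cs.drop (i + 1)) sub
            rw [List.length_drop] at hkle
            rw [if_neg hk,
                dif_pos ⟨by omega, by omega, by omega⟩,
                dif_pos ⟨by omega, by omega, by omega⟩]
        rw [hBstep]
        simp only [hd1, hd2, hslice]
        rw [if_neg (by intro hc; exact hp (hpref_iff.mp hc.2.2))]
        rw [hcast]
        exact ih (i + 1) (by omega) (by omega)

-- ===== VERDICT (by name: the statement is the Claim_ definition above) =====
theorem split_top_py_spec : Claim_equal_split_top_py := by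
  intro s sep _ hpre
  unfold Spec_split_top_py split_top_py split_top_py_alt
  have hsub : sep.toList ≠ [] := by
    intro h
    apply hpre
    cases sep
    simp_all
  have hmain := pv_main s.toList sep.toList hsub s.toList.length 0 (by omega) (by omega)
  rw [pvBscan_snd]
  simpa using hmain
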